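-- pv_equiv track=rewrite | github.com/xginn8/GlobalEnergyGIS | saveregions.py | longest_circular_sequence
-- ===== SOURCE A (Python) =====
-- from typing import Generic, List, Tuple, TypeVar
--
-- def longest_circular_sequence(v: List[int], x) -> List[int]:
--     longest = []
--     current = []
--     haswrapped = False
--     i = 0
--     len_v = len(v)
--     sequencelength = lambda seq: 0 if not seq else (seq[1] - seq[0]) % len_v + 1
--     while True:
--         if v[i] == x:
--             if not current:
--                 current = [i, i]
--             else:
--                 current[1] = i
--         else:
--             longest = (
--                 current
--                 if sequencelength(current) > sequencelength(longest)
--                 else longest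
--             )
--             if haswrapped:
--                 return longest
--             current = []
--         if not haswrapped and i == len_v - 1:
--             haswrapped = True
--             i = 0
--             if sequencelength(current) == len_v:
--                 return current
--         else:
--             i += 1
--         if i >= len_v:
--             break
--     return longest
-- ===== SOURCE B (Python) =====
-- def longest_circular_sequence(v, x):
--     n = len(v)
--     # one pass: collect maximal runs of x as (start, end) index pairs
--     runs = []
--     start = None
--     for i in range(n):
--         if v[i] == x:
--             if start is None:
--                 start = i
--         else:
--             if start is not None:
--                 runs.append((start, i - 1))
--                 start = None
--     if start is not None:
--         runs.append((start, n - 1))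
--     if not runs:
--         return []
--     first = runs[0]
--     last = runs[-1]
--     if first[0] == 0 and last[1] == n - 1:
--         if len(runs) == 1:
--             return [0, n - 1]      # every element equals x
--         # wrap: merge the trailing run with the leading one
--         runs = runs[:-1] + [(last[0], first[1])]
--     length = lambda r: (r[1] - r[0]) % n + 1
--     best = runs[0]
--     for r in runs[1:]:
--         if length(r) > length(best):
--             best = r
--     return [best[0], best[1]]
-- ===== Notes on version B (the rewrite author's own statement) =====
-- stated objective: simpler
-- what changed: A's stateful while-True loop with wrap-around index reset, per-iteration lambda calls and a second pass over the leading run is replaced by a single linear scan collecting maximal runs of x as (start,end) pairs, merging the trailing run with the leading one on wrap, then picking the longest run (earliest on ties).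
import Mathlib
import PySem

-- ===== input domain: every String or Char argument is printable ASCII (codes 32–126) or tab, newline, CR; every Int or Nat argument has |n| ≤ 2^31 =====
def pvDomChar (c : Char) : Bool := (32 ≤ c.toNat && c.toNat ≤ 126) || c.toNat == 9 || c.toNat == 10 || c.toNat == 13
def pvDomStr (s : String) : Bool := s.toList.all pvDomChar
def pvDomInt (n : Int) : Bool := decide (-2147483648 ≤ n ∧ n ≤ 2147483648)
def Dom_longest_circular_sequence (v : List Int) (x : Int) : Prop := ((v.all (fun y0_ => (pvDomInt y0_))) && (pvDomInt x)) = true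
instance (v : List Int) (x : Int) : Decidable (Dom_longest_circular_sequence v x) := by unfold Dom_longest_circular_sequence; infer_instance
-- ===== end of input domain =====

-- B replaces A's stateful two-pass while-loop by a single scan collecting the maximal runs of x
-- as (start, end) pairs, merging the wrapping run, and taking the longest (objective: simpler one-pass decomposition).

-- ===== PORT A =====
-- sequencelength lambda of A (seq is always [] or a two-element [s, e]; pyGetD's default is never used on those shapes)
def pySeqLen (n : Int) (seq : List Int) : Int :=
  if seq = [] then 0
  else PySem.Int.mod (PySem.List.pyGetD seq 1 0 - PySem.List.pyGetD seq 0 0) n + 1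

-- A's `while True` loop, one fuel unit per iteration; 2*len(v)+2 units always suffice (first pass
-- ≤ len(v) iterations, then at most one wrapped pass).  On `pyGet? = none` (IndexError, only for
-- v = [], excluded by Pre_) it stops returning `longest`.
def loopA (v : List Int) (x : Int) : Nat → List Int → List Int → Bool → Int → List Int
  | 0, longest, _, _, _ => longest
  | fuel+1, longest, current, haswrapped, i =>
    let n : Int := (v.length : Int)
    let tail := fun (longest current : List Int) =>
      if haswrapped = false ∧ i = n - 1 then
        if pySeqLen n current = n then current
        else if (0:Int) ≥ n then longest
        else loopA v x fuel longest current true 0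
      else if i + 1 ≥ n then longest
      else loopA v x fuel longest current haswrapped (i + 1)
    match PySem.List.pyGet? v i with
    | none => longest
    | some vi =>
      if vi = x then
        tail longest (if current = [] then [i, i] else [PySem.List.pyGetD current 0 0, i])
      else
        let longest' := if pySeqLen n current > pySeqLen n longest then current else longest
        if haswrapped = true then longest'
        else tail longest' []

def longest_circular_sequence (v : List Int) (x : Int) : List Int :=
  loopA v x (2 * v.length + 2) [] [] false 0

-- ===== PORT B =====
def runLen (n : Int) (r : Int × Int) : Int := PySem.Int.mod (r.2 - r.1) n + 1

-- the collecting for-loop of B (index carried explicitly)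
def collectRuns (x : Int) : List Int → Int → List (Int × Int) → Option Int → List (Int × Int) × Option Int
  | [], _, runs, start => (runs, start)
  | a :: rest, i, runs, start =>
    if a = x then collectRuns x rest (i + 1) runs (if start.isSome then start else some i)
    else
      match start with
      | none => collectRuns x rest (i + 1) runs none
      | some s => collectRuns x rest (i + 1) (runs ++ [(s, i - 1)]) none

-- the best-selection for-loop of B
def bestRun (n : Int) : Int × Int → List (Int × Int) → Int × Int
  | best, [] => best
  | best, r :: rest => bestRun n (if runLen n r > runLen n best then r else best) rest

def longest_circular_sequence_alt (v : List Int) (x : Int) : List Int :=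
  let n : Int := (v.length : Int)
  let p := collectRuns x v 0 [] none
  let runs1 := match p.2 with | none => p.1 | some s => p.1 ++ [(s, n - 1)]
  match runs1 with
  | [] => []
  | r0 :: rest =>
    let last := (r0 :: rest).getLast (List.cons_ne_nil _ _)
    if r0.1 = 0 ∧ last.2 = n - 1 then
      if rest = [] then [0, n - 1]
      else
        let b := bestRun n r0 (rest.dropLast ++ [(last.1, r0.2)])
        [b.1, b.2]
    else
      let b := bestRun n r0 rest
      [b.1, b.2]

-- ===== PRECONDITION & SPEC =====
-- Pre_ excludes only the empty list, on which A's `v[0]` raises IndexError.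
def Pre_longest_circular_sequence (v : List Int) (x : Int) : Prop := v ≠ []
instance (v : List Int) (x : Int) : Decidable (Pre_longest_circular_sequence v x) := by
  unfold Pre_longest_circular_sequence; infer_instance
def pvWitness_longest_circular_sequence : List Int × Int := ([1, 0, 1], 1)

def Spec_longest_circular_sequence (v : List Int) (x : Int) (out : List Int) : Prop :=
  out = longest_circular_sequence_alt v x
instance (v : List Int) (x : Int) (out : List Int) : Decidable (Spec_longest_circular_sequence v x out) := by
  unfold Spec_longest_circular_sequence; infer_instance

-- ===== CLAIM (what is proved, stated in full; the proofs are below) =====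
def Claim_equal_longest_circular_sequence : Prop := ∀ (v : List Int) (x : Int), Dom_longest_circular_sequence v x → Pre_longest_circular_sequence v x → Spec_longest_circular_sequence v x (longest_circular_sequence v x)

-- ===== LEMMAS AND PROOFS =====

-- proof-side abbreviations for the two state updates of A's loop body
def maxsel (N : Int) (L C : List Int) : List Int := if pySeqLen N C > pySeqLen N L then C else L
def extend (C : List Int) (i : Int) : List Int :=
  if C = [] then [i, i] else [PySem.List.pyGetD C 0 0, i]

-- A's second (wrapped) pass as a structural walk over the remaining list
def spWalk (N x : Int) : List Int → List Int → List Int → Int → List Int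
  | [], L, _, _ => L
  | a :: rest, L, C, i =>
    if a = x then spWalk N x rest L (extend C i) (i + 1) else maxsel N L C

-- A's first pass (last element wraps) as a structural walk
def fpWalk (N x : Int) (v : List Int) : List Int → List Int → List Int → Int → List Int
  | [], L, _, _ => L
  | a :: rest, L, C, i =>
    if a = x then
      match rest with
      | [] => if pySeqLen N (extend C i) = N then extend C i else spWalk N x v L (extend C i) 0
      | _ :: _ => fpWalk N x v rest L (extend C i) (i + 1)
    else
      match rest with
      | [] => spWalk N x v (maxsel N L C) [] 0
      | _ :: _ => fpWalk N x v rest (maxsel N L C) [] (i + 1)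

-- B's post-processing of the collected runs, as a function
def post (N : Int) (p : List (Int × Int) × Option Int) : List Int :=
  let runs1 := match p.2 with | none => p.1 | some s => p.1 ++ [(s, N - 1)]
  match runs1 with
  | [] => []
  | r0 :: rest =>
    let last := (r0 :: rest).getLast (List.cons_ne_nil _ _)
    if r0.1 = 0 ∧ last.2 = N - 1 then
      if rest = [] then [0, N - 1]
      else
        let b := bestRun N r0 (rest.dropLast ++ [(last.1, r0.2)])
        [b.1, b.2]
    else
      let b := bestRun N r0 rest
      [b.1, b.2]

def runStep (N : Int) (L : List Int) (r : Int × Int) : List Int := maxsel N L [r.1, r.2]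
def foldBest (N : Int) (runs : List (Int × Int)) : List Int := runs.foldl (runStep N) []

lemma pySeqLen_nil (N : Int) : pySeqLen N [] = 0 := by simp [pySeqLen]

lemma pySeqLen_pair (N s e : Int) : pySeqLen N [s, e] = runLen N (s, e) := by
  simp [pySeqLen, runLen, PySem.List.pyGetD]

lemma runLen_pos (N : Int) (hN : 0 < N) (r : Int × Int) : 1 ≤ runLen N r := by
  have := PySem.Int.mod_nonneg (r.2 - r.1) hN
  simp [runLen]; omega

lemma maxsel_ge_left (N : Int) (L C : List Int) : pySeqLen N L ≤ pySeqLen N (maxsel N L C) := by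
  simp only [maxsel]; split_ifs with h <;> omega

lemma maxsel_ge_right (N : Int) (L C : List Int) : pySeqLen N C ≤ pySeqLen N (maxsel N L C) := by
  simp only [maxsel]; split_ifs with h <;> omega

lemma foldl_runStep_ge (N : Int) (rs : List (Int × Int)) (L : List Int) :
    pySeqLen N L ≤ pySeqLen N (rs.foldl (runStep N) L) := by
  induction rs generalizing L with
  | nil => simp
  | cons r rs ih =>
    calc pySeqLen N L ≤ pySeqLen N (runStep N L r) := maxsel_ge_left N L [r.1, r.2]
    _ ≤ _ := ih _

lemma foldBest_nonneg (N : Int) (runs : List (Int × Int)) :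
    0 ≤ pySeqLen N (foldBest N runs) := by
  have := foldl_runStep_ge N runs []
  simpa [foldBest, pySeqLen_nil] using this

lemma foldl_runStep_ge_mem (N : Int) (rs : List (Int × Int)) (r : Int × Int) (hr : r ∈ rs) :
    ∀ L, runLen N r ≤ pySeqLen N (rs.foldl (runStep N) L) := by
  induction rs with
  | nil => cases hr
  | cons a as ih =>
    intro L
    rcases List.mem_cons.mp hr with h | h
    · subst h
      calc runLen N r = pySeqLen N [r.1, r.2] := (pySeqLen_pair N r.1 r.2).symm
      _ ≤ pySeqLen N (runStep N L r) := maxsel_ge_right N L [r.1, r.2]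
      _ ≤ _ := foldl_runStep_ge N as _
    · exact ih h _

lemma foldBest_ge_mem (N : Int) (runs : List (Int × Int)) (r : Int × Int) (hr : r ∈ runs) :
    runLen N r ≤ pySeqLen N (foldBest N runs) :=
  foldl_runStep_ge_mem N runs r hr []

lemma bestRun_eq_foldl (N : Int) (rs : List (Int × Int)) (b : Int × Int) :
    [(bestRun N b rs).1, (bestRun N b rs).2] = rs.foldl (runStep N) [b.1, b.2] := by
  induction rs generalizing b with
  | nil => simp [bestRun]
  | cons r rs ih =>
    simp only [bestRun, List.foldl_cons]
    rw [ih]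
    have : runStep N [b.1, b.2] r = [(if runLen N r > runLen N b then r else b).1,
        (if runLen N r > runLen N b then r else b).2] := by
      simp only [runStep, maxsel, pySeqLen_pair]; split_ifs <;> simp_all
    rw [this]

lemma foldBest_cons (N : Int) (hN : 0 < N) (r : Int × Int) (rs : List (Int × Int)) :
    foldBest N (r :: rs) = rs.foldl (runStep N) [r.1, r.2] := by
  have h1 : runStep N [] r = [r.1, r.2] := by
    have := runLen_pos N hN r
    simp [runStep, maxsel, pySeqLen_nil, pySeqLen_pair]; omega
  simp [foldBest, h1]

lemma foldBest_append_singleton (N : Int) (rs : List (Int × Int)) (r : Int × Int) :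
    foldBest N (rs ++ [r]) = maxsel N (foldBest N rs) [r.1, r.2] := by
  simp [foldBest, List.foldl_append, runStep]


lemma maxsel_of_le (N : Int) (L C : List Int) (h : pySeqLen N C ≤ pySeqLen N L) :
    maxsel N L C = L := by
  simp only [maxsel]; rw [if_neg (by omega)]

lemma mod_small (a b : Int) (h0 : 0 ≤ a) (h1 : a < b) : PySem.Int.mod a b = a := by
  rw [PySem.Int.mod_eq_emod_of_pos (by omega)]
  exact Int.emod_eq_of_lt h0 h1

-- B's post-processing after forming runs1
def postRuns (N : Int) : List (Int × Int) → List Int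
  | [] => []
  | r0 :: rest =>
    let last := (r0 :: rest).getLast (List.cons_ne_nil _ _)
    if r0.1 = 0 ∧ last.2 = N - 1 then
      if rest = [] then [0, N - 1]
      else
        let b := bestRun N r0 (rest.dropLast ++ [(last.1, r0.2)])
        [b.1, b.2]
    else
      let b := bestRun N r0 rest
      [b.1, b.2]

lemma post_eq_postRuns (N : Int) (p : List (Int × Int) × Option Int) :
    post N p = postRuns N (match p.2 with | none => p.1 | some s => p.1 ++ [(s, N - 1)]) := by
  obtain ⟨runs, start⟩ := p
  cases start <;> cases runs <;> rfl

lemma postRuns_nomerge (N : Int) (hN : 0 < N) (r0 : Int × Int) (rest : List (Int × Int))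
    (hc : ¬ (r0.1 = 0 ∧ ((r0 :: rest).getLast (List.cons_ne_nil _ _)).2 = N - 1)) :
    postRuns N (r0 :: rest) = foldBest N (r0 :: rest) := by
  simp only [postRuns, if_neg hc]
  rw [bestRun_eq_foldl, foldBest_cons N hN]

lemma postRuns_merge (N : Int) (hN : 0 < N) (r0 : Int × Int) (rest : List (Int × Int))
    (hne : rest ≠ []) (h0 : r0.1 = 0)
    (hl : ((r0 :: rest).getLast (List.cons_ne_nil _ _)).2 = N - 1) :
    postRuns N (r0 :: rest) =
      foldBest N (r0 :: (rest.dropLast ++ [(((r0 :: rest).getLast (List.cons_ne_nil _ _)).1, r0.2)])) := by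
  simp only [postRuns, if_pos (And.intro h0 hl), if_neg hne]
  rw [bestRun_eq_foldl, foldBest_cons N hN]

-- start index recorded by `extend`
def startOf (C : List Int) (j : Int) : Int := if C = [] then j else PySem.List.pyGetD C 0 0

lemma extend_eq (C : List Int) (j : Int) : extend C j = [startOf C j, j] := by
  simp [extend, startOf]; split_ifs <;> rfl

-- the wrapped pass across a maximal run [j..e] of x followed by a mismatch
lemma spWalk_run (v : List Int) (N x : Int) :
    ∀ (d j : Nat) (L C : List Int), (j + d) + 1 < v.length →
    (∀ k : Nat, j ≤ k → k ≤ j + d → v[k]? = some x) →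
    v[j + d + 1]? ≠ some x →
    spWalk N x (v.drop j) L C (j : Int) = maxsel N L [startOf C (j : Int), ((j + d : Nat) : Int)] := by
  intro d
  induction d with
  | zero =>
    intro j L C hlt hall hmis
    have hj : j < v.length := by omega
    have hj1 : j + 1 < v.length := by omega
    rw [List.drop_eq_getElem_cons hj]
    have hvj : v[j] = x := by
      have := hall j le_rfl (by omega)
      simpa [List.getElem?_eq_getElem hj] using this
    simp only [spWalk, hvj, if_pos rfl]
    rw [List.drop_eq_getElem_cons hj1]
    have hvj1 : v[j + 1] ≠ x := by
      intro h
      exact hmis (by simp [List.getElem?_eq_getElem hj1, h])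
    simp only [spWalk, if_neg hvj1]
    rw [extend_eq]
    norm_num
  | succ d ih =>
    intro j L C hlt hall hmis
    have hj : j < v.length := by omega
    rw [List.drop_eq_getElem_cons hj]
    have hvj : v[j] = x := by
      have := hall j le_rfl (by omega)
      simpa [List.getElem?_eq_getElem hj] using this
    simp only [spWalk, hvj, if_pos rfl]
    have hrec := ih (j + 1) L (extend C j)
      (by omega)
      (fun k hk1 hk2 => hall k (by omega) (by omega))
      (by have : j + 1 + d + 1 = j + (d + 1) + 1 := by omega
          rw [this]; exact hmis)
    have hcast : ((j : Int) + 1) = ((j + 1 : Nat) : Int) := by push_cast; ring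
    rw [hcast, hrec]
    have hs : startOf (extend C (j : Int)) ((j + 1 : Nat) : Int) = startOf C (j : Int) := by
      rw [extend_eq]
      simp [startOf, PySem.List.pyGetD]
    rw [hs]
    have hnat : j + 1 + d = j + (d + 1) := by omega
    rw [hnat]
    simp

lemma spWalk_mismatch (N x a : Int) (rest L C : List Int) (i : Int) (ha : a ≠ x) :
    spWalk N x (a :: rest) L C i = maxsel N L C := by
  simp [spWalk, ha]


lemma spWalk_firstrun (v : List Int) (N x : Int) (L C : List Int) (e : Int)
    (he : 0 ≤ e) (hlt : e.toNat + 1 < v.length)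
    (hall : ∀ k : Nat, (k : Int) ≤ e → v[k]? = some x)
    (hmis : v[e.toNat + 1]? ≠ some x) :
    spWalk N x v L C 0 = maxsel N L [startOf C 0, e] := by
  have := spWalk_run v N x e.toNat 0 L C (by omega)
    (fun k _ hk => hall k (by omega)) (by simpa using hmis)
  simp only [List.drop_zero, Nat.cast_zero, Nat.zero_add, zero_add] at this
  have he' : ((e.toNat : Nat) : Int) = e := by omega
  rw [this, he']

lemma maxsel_foldBest_mem (N : Int) (runs : List (Int × Int)) (r : Int × Int) (hr : r ∈ runs) :
    maxsel N (foldBest N runs) [r.1, r.2] = foldBest N runs := by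
  apply maxsel_of_le
  rw [pySeqLen_pair]
  exact foldBest_ge_mem N runs r hr

lemma postRuns_single_full (N : Int) : postRuns N [(0, N - 1)] = [0, N - 1] := by
  simp [postRuns]

lemma postRuns_single_nomerge (N : Int) (hN : 0 < N) (r : Int × Int) (hr : r.1 ≠ 0) :
    postRuns N [r] = foldBest N [r] :=
  postRuns_nomerge N hN r [] (fun h => hr h.1)

lemma postRuns_concat_nomerge_fst (N : Int) (hN : 0 < N) (q : Int × Int) (qs : List (Int × Int))
    (r : Int × Int) (hq : q.1 ≠ 0) :
    postRuns N ((q :: qs) ++ [r]) = foldBest N ((q :: qs) ++ [r]) := by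
  rw [List.cons_append]
  exact postRuns_nomerge N hN q (qs ++ [r]) (fun h => hq h.1)

lemma postRuns_nomerge_last (N : Int) (hN : 0 < N) (q : Int × Int) (qs : List (Int × Int))
    (hl : ((q :: qs).getLast (List.cons_ne_nil _ _)).2 ≠ N - 1) :
    postRuns N (q :: qs) = foldBest N (q :: qs) :=
  postRuns_nomerge N hN q qs (fun h => hl h.2)

lemma postRuns_concat_merge (N : Int) (hN : 0 < N) (q : Int × Int) (qs : List (Int × Int))
    (r : Int × Int) (hq : q.1 = 0) (hr2 : r.2 = N - 1) :
    postRuns N ((q :: qs) ++ [r]) = foldBest N ((q :: qs) ++ [(r.1, q.2)]) := by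
  have hlast : ((q :: (qs ++ [r])).getLast (List.cons_ne_nil _ _)) = r := by simp
  rw [List.cons_append]
  rw [postRuns_merge N hN q (qs ++ [r]) (by simp) hq (by rw [hlast]; exact hr2)]
  rw [hlast, List.dropLast_concat]
  rfl


lemma spWalk_nonmatch_head (N x : Int) (v L C : List Int) (i : Int)
    (hv : v ≠ []) (h : v[0]? ≠ some x) : spWalk N x v L C i = maxsel N L C := by
  obtain ⟨c, cs, rfl⟩ := List.exists_cons_of_ne_nil hv
  have hc : c ≠ x := by intro hcx; exact h (by simp [hcx])
  simp [spWalk, hc]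

-- the wrap step when the last element matches: current is [s', N-1]
lemma wrap_match (v : List Int) (x : Int) (L : List Int) (runs : List (Int × Int)) (s' : Int)
    (i : Nat) (hi1 : i + 1 = v.length)
    (hL : L = foldBest ((v.length : Nat) : Int) runs)
    (hs'0 : 0 ≤ s') (hs'i : s' ≤ (i : Int))
    (hz : s' = 0 → runs = [] ∧ ∀ k : Nat, k < i → v[k]? = some x)
    (hpos : 0 < s' → runs = [] → v[0]? ≠ some x)
    (h3 : ∀ r ∈ runs, 0 ≤ r.1 ∧ r.1 ≤ r.2 ∧ r.2 ≤ (i : Int) - 2)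
    (h5 : ∀ r0 rs, runs = r0 :: rs →
       (0 < r0.1 → v[0]? ≠ some x) ∧
       (r0.1 = 0 → (∀ k : Nat, (k : Int) ≤ r0.2 → v[k]? = some x) ∧ v[r0.2.toNat + 1]? ≠ some x)) :
    (if pySeqLen ((v.length : Nat) : Int) [s', (i : Int)] = ((v.length : Nat) : Int)
     then [s', (i : Int)]
     else spWalk ((v.length : Nat) : Int) x v L [s', (i : Int)] 0)
      = postRuns ((v.length : Nat) : Int) (runs ++ [(s', ((v.length : Nat) : Int) - 1)]) := by
  have hN : (0:Int) < ((v.length : Nat) : Int) := by omega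
  have hiN : (i : Int) = ((v.length : Nat) : Int) - 1 := by omega
  have hvne : v ≠ [] := List.ne_nil_of_length_pos (by omega)
  have hps : pySeqLen ((v.length : Nat) : Int) [s', (i : Int)] = ((v.length : Nat) : Int) - s' := by
    rw [pySeqLen_pair]
    simp only [runLen]
    rw [mod_small _ _ (by omega) (by omega)]
    omega
  rw [hps]
  by_cases hs0 : s' = 0
  · subst hs0
    obtain ⟨hrn, _⟩ := hz rfl
    subst hrn
    rw [if_pos (by omega)]
    rw [show ([] : List (Int × Int)) ++ [((0:Int), ((v.length : Nat) : Int) - 1)]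
        = [((0:Int), ((v.length : Nat) : Int) - 1)] from rfl]
    rw [postRuns_single_full]
    rw [hiN]
  · rw [if_neg (by omega)]
    cases runs with
    | nil =>
      have hv0 : v[0]? ≠ some x := hpos (by omega) rfl
      rw [spWalk_nonmatch_head _ _ _ _ _ _ hvne hv0]
      rw [List.nil_append, postRuns_single_nomerge _ hN _ hs0]
      rw [hL, hiN]
      simp [foldBest, runStep]
    | cons q qs =>
      by_cases hq0 : q.1 = 0
      · obtain ⟨hall, hmis⟩ := (h5 q qs rfl).2 hq0
        have hq3 := h3 q List.mem_cons_self
        have hA := spWalk_firstrun v ((v.length : Nat) : Int) x L [s', (i : Int)] q.2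
          (by omega) (by omega) hall hmis
        rw [hA]
        rw [postRuns_concat_merge _ hN _ _ _ hq0 rfl]
        rw [foldBest_append_singleton, ← hL]
        try congr 1
        try simp [startOf, PySem.List.pyGetD]
      · have hqpos : 0 < q.1 := by have := h3 q List.mem_cons_self; omega
        have hv0 : v[0]? ≠ some x := (h5 q qs rfl).1 hqpos
        rw [spWalk_nonmatch_head _ _ _ _ _ _ hvne hv0]
        rw [postRuns_concat_nomerge_fst _ hN _ _ _ hq0]
        rw [foldBest_append_singleton, ← hL, hiN]
        try rfl

-- the wrap step when the last element does not match: current is empty, runs' are final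
lemma wrap_nonmatch (v : List Int) (x : Int) (L : List Int) (runs' : List (Int × Int))
    (i : Nat) (hi1 : i + 1 = v.length)
    (hL : L = foldBest ((v.length : Nat) : Int) runs')
    (hb : ∀ r ∈ runs', 0 ≤ r.1 ∧ r.1 ≤ r.2 ∧ r.2 ≤ (i : Int) - 1)
    (h4 : runs' = [] → v[0]? ≠ some x)
    (h5 : ∀ r0 rs, runs' = r0 :: rs →
       (0 < r0.1 → v[0]? ≠ some x) ∧
       (r0.1 = 0 → (∀ k : Nat, (k : Int) ≤ r0.2 → v[k]? = some x) ∧ v[r0.2.toNat + 1]? ≠ some x)) :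
    spWalk ((v.length : Nat) : Int) x v L [] 0 = postRuns ((v.length : Nat) : Int) runs' := by
  have hN : (0:Int) < ((v.length : Nat) : Int) := by omega
  have hvne : v ≠ [] := List.ne_nil_of_length_pos (by omega)
  cases runs' with
  | nil =>
    rw [spWalk_nonmatch_head _ _ _ _ _ _ hvne (h4 rfl)]
    rw [maxsel_of_le _ _ _ (by rw [pySeqLen_nil, hL]; exact foldBest_nonneg _ _)]
    rw [hL]
    rfl
  | cons q qs =>
    have hlast : ((q :: qs).getLast (List.cons_ne_nil _ _)).2 ≠ ((v.length : Nat) : Int) - 1 := by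
      have := hb _ (List.getLast_mem (List.cons_ne_nil _ _))
      omega
    rw [postRuns_nomerge_last _ hN _ _ hlast, ← hL]
    by_cases hq0 : q.1 = 0
    · obtain ⟨hall, hmis⟩ := (h5 q qs rfl).2 hq0
      have hq3 := hb q List.mem_cons_self
      rw [spWalk_firstrun v ((v.length : Nat) : Int) x L [] q.2 (by omega) (by omega) hall hmis]
      have hq : ((0 : Int), q.2) = q := by
        ext <;> simp [hq0.symm]
      rw [show startOf ([] : List Int) 0 = (0:Int) from rfl]
      rw [show ([(0:Int), q.2] : List Int) = [((0:Int), q.2).1, ((0:Int), q.2).2] from rfl, hq, hL]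
      exact maxsel_foldBest_mem _ _ _ List.mem_cons_self
    · have hqpos : 0 < q.1 := by have := hb q List.mem_cons_self; omega
      rw [spWalk_nonmatch_head _ _ _ _ _ _ hvne ((h5 q qs rfl).1 hqpos)]
      exact maxsel_of_le _ _ _ (by rw [pySeqLen_nil, hL]; exact foldBest_nonneg _ _)

-- the loop invariant tying A's (longest, current) to B's (runs, start) after scanning v[0..i-1]
def LoopInv (v : List Int) (x N : Int) (i : Nat) (runs : List (Int × Int)) (start : Option Int)
    (L C : List Int) : Prop :=
  L = foldBest N runs ∧
  (match start with
   | none => C = []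
   | some s => 0 ≤ s ∧ s < (i : Int) ∧ C = [s, (i : Int) - 1] ∧
       (s = 0 → runs = [] ∧ ∀ k : Nat, k < i → v[k]? = some x) ∧
       (0 < s → runs = [] → v[0]? ≠ some x)) ∧
  (∀ r ∈ runs, 0 ≤ r.1 ∧ r.1 ≤ r.2 ∧ r.2 ≤ (i : Int) - 2) ∧
  (runs = [] → start = none → 0 < i → v[0]? ≠ some x) ∧
  (∀ r0 rs, runs = r0 :: rs →
     (0 < r0.1 → v[0]? ≠ some x) ∧
     (r0.1 = 0 → (∀ k : Nat, (k : Int) ≤ r0.2 → v[k]? = some x) ∧ v[r0.2.toNat + 1]? ≠ some x))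

-- MAIN: the first-pass walk computes B's post-processing of the collected runs
lemma fpWalk_post (v : List Int) (x : Int) :
    ∀ (l : List Int) (i : Nat) (runs : List (Int × Int)) (start : Option Int) (L C : List Int),
    v.drop i = l → l ≠ [] →
    LoopInv v x (v.length : Int) i runs start L C →
    fpWalk (v.length : Int) x v l L C (i : Int) =
      post (v.length : Int) (collectRuns x l (i : Int) runs start) := by
  intro l
  induction l with
  | nil => intro i runs start L C _ hne _; exact absurd rfl hne
  | cons a rest ih =>
    intro i runs start L C hdrop hne hInv
    obtain ⟨h1, h2, h3, h4, h5⟩ := hInv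
    have hlen : i + rest.length + 1 = v.length := by
      have := congrArg List.length hdrop; simp at this; omega
    have hi : i < v.length := by omega
    have hN : (0:Int) < (v.length : Int) := by omega
    have hget : v[i]? = some a := by
      have h0 : v[i]? = (v.drop i)[0]? := by simp [List.getElem?_drop]
      rw [h0, hdrop]; rfl
    have hdrop1 : v.drop (i + 1) = rest := by
      have h1' : v.drop (i + 1) = (v.drop i).drop 1 := by rw [List.drop_drop]
      rw [h1', hdrop]; rfl
    have hcast : ((i : Int) + 1) = ((i + 1 : Nat) : Int) := by push_cast; ring
    have hruns0 : i = 0 → runs = [] := by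
      intro h0; cases runs with
      | nil => rfl
      | cons q qs =>
        exfalso
        have := h3 q (List.mem_cons_self)
        subst h0; simp at this; omega
    cases rest with
    | cons b bs =>
      have hi1 : i + 1 < v.length := by simp at hlen; omega
      by_cases hax : a = x
      · rw [show fpWalk ((v.length : Nat) : Int) x v (a :: b :: bs) L C (i : Int)
            = fpWalk ((v.length : Nat) : Int) x v (b :: bs) L (extend C (i : Int)) ((i : Int) + 1) from by
          simp only [fpWalk, if_pos hax]]
        rw [show collectRuns x (a :: b :: bs) (i : Int) runs start
            = collectRuns x (b :: bs) ((i : Int) + 1) runs (if start.isSome then start else some (i : Int)) from by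
          simp only [collectRuns, if_pos hax]]
        rw [hcast]
        apply ih (i + 1) runs _ L (extend C (i : Int)) hdrop1 (List.cons_ne_nil _ _)
        cases start with
        | none =>
          have hC : C = [] := h2
          subst hC
          refine ⟨h1, ?_, ?_, ?_, h5⟩
          · simp only [Option.isSome_none, Bool.false_eq_true, if_false]
            refine ⟨by positivity, by push_cast; omega, by rw [extend_eq]; simp [startOf]; try omega, ?_, ?_⟩
            · intro h0
              have hi0 : i = 0 := by omega
              refine ⟨hruns0 hi0, ?_⟩
              intro k hk
              have : k = 0 := by omega
              subst this
              rw [show (0:Nat) = i from hi0.symm, hget, hax]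
            · intro hpos hrn
              exact h4 hrn rfl (by omega)
          · intro r hr
            have := h3 r hr
            exact ⟨this.1, this.2.1, by push_cast; push_cast at this; omega⟩
          · intro _ habs
            simp at habs
        | some s =>
          obtain ⟨hs0, hsi, hC, hz, hp⟩ := h2
          subst hC
          refine ⟨h1, ?_, ?_, ?_, h5⟩
          · simp only [Option.isSome_some, if_pos]
            refine ⟨hs0, by push_cast; omega, ?_, ?_, hp⟩
            · rw [extend_eq]
              simp [startOf, PySem.List.pyGetD]
              try omega
            · intro h0
              obtain ⟨hrn, hall⟩ := hz h0
              refine ⟨hrn, ?_⟩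
              intro k hk
              by_cases hki : k < i
              · exact hall k hki
              · have : k = i := by omega
                subst this
                rw [hget, hax]
          · intro r hr
            have := h3 r hr
            exact ⟨this.1, this.2.1, by push_cast; push_cast at this; omega⟩
          · intro _ habs
            simp at habs
      · rw [show fpWalk ((v.length : Nat) : Int) x v (a :: b :: bs) L C (i : Int)
            = fpWalk ((v.length : Nat) : Int) x v (b :: bs) (maxsel ((v.length : Nat) : Int) L C) [] ((i : Int) + 1) from by
          simp only [fpWalk, if_neg hax]]
        cases start with
        | none =>
          have hC : C = [] := h2
          subst hC
          have hL : maxsel ((v.length : Nat) : Int) L [] = L := by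
            apply maxsel_of_le
            rw [pySeqLen_nil, h1]
            exact foldBest_nonneg _ _
          rw [show collectRuns x (a :: b :: bs) (i : Int) runs none
              = collectRuns x (b :: bs) ((i : Int) + 1) runs none from by
            simp only [collectRuns, if_neg hax]]
          rw [hL, hcast]
          apply ih (i + 1) runs none L [] hdrop1 (List.cons_ne_nil _ _)
          refine ⟨h1, rfl, ?_, ?_, h5⟩
          · intro r hr
            have := h3 r hr
            exact ⟨this.1, this.2.1, by push_cast; push_cast at this; omega⟩
          · intro hrn _ _
            by_cases hi0 : i = 0
            · rw [show (0:Nat) = i from hi0.symm, hget]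
              simp [hax]
            · exact h4 hrn rfl (by omega)
        | some s =>
          obtain ⟨hs0, hsi, hC, hz, hp⟩ := h2
          subst hC
          rw [show collectRuns x (a :: b :: bs) (i : Int) runs (some s)
              = collectRuns x (b :: bs) ((i : Int) + 1) (runs ++ [(s, (i : Int) - 1)]) none from by
            simp only [collectRuns, if_neg hax]]
          have hL' : maxsel ((v.length : Nat) : Int) L [s, (i : Int) - 1]
              = foldBest ((v.length : Nat) : Int) (runs ++ [(s, (i : Int) - 1)]) := by
            rw [h1, foldBest_append_singleton]
          rw [hL', hcast]
          apply ih (i + 1) (runs ++ [(s, (i : Int) - 1)]) none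
            (foldBest ((v.length : Nat) : Int) (runs ++ [(s, (i : Int) - 1)])) []
            hdrop1 (List.cons_ne_nil _ _)
          refine ⟨rfl, rfl, ?_, ?_, ?_⟩
          · intro r hr
            rcases List.mem_append.mp hr with h | h
            · have := h3 r h
              exact ⟨this.1, this.2.1, by push_cast; push_cast at this; omega⟩
            · simp at h
              subst h
              exact ⟨hs0, by omega, by push_cast; omega⟩
          · intro habs
            simp at habs
          · intro r0 rs0 heq
            cases runs with
            | nil =>
              obtain ⟨heq1, heq2⟩ := List.cons.inj (by simpa using heq)
              subst heq1
              constructor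
              · intro hpos
                exact hp hpos rfl
              · intro h0
                obtain ⟨_, hall⟩ := hz h0
                have hs00 : s = 0 := h0
                have hipos : 0 < i := by omega
                refine ⟨?_, ?_⟩
                · intro k hk
                  have hk' : (k : Int) ≤ (i : Int) - 1 := hk
                  exact hall k (by omega)
                · show v[((i : Int) - 1).toNat + 1]? ≠ some x
                  have htn : ((i : Int) - 1).toNat + 1 = i := by omega
                  rw [htn, hget]
                  simp [hax]
            | cons q qs =>
              have heq1 : q = r0 := by
                have := congrArg (fun l => l.head?) heq
                simpa using this
              subst heq1
              exact h5 q qs rfl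
    | nil =>
      have hi1 : i + 1 = v.length := by simpa using hlen
      by_cases hax : a = x
      · cases start with
        | none =>
          have hC : C = [] := h2
          subst hC
          have hext : extend ([] : List Int) (i : Int) = [(i : Int), (i : Int)] := by
            simp [extend]
          rw [show fpWalk ((v.length : Nat) : Int) x v [a] L [] (i : Int)
              = (if pySeqLen ((v.length : Nat) : Int) [(i : Int), (i : Int)] = ((v.length : Nat) : Int)
                 then [(i : Int), (i : Int)]
                 else spWalk ((v.length : Nat) : Int) x v L [(i : Int), (i : Int)] 0) from by
            simp only [fpWalk, if_pos hax]
            rw [hext]]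
          have hcoll : collectRuns x [a] (i : Int) runs none = (runs, some (i : Int)) := by
            simp [collectRuns, hax]
          rw [hcoll,
            show post ((v.length : Nat) : Int) (runs, some (i : Int))
              = postRuns ((v.length : Nat) : Int) (runs ++ [((i : Int), ((v.length : Nat) : Int) - 1)])
              from post_eq_postRuns _ _]
          apply wrap_match v x L runs (i : Int) i hi1 h1 (by positivity) le_rfl
          · intro h0
            have hi0 : i = 0 := by omega
            subst hi0
            exact ⟨hruns0 rfl, fun k hk => absurd hk (Nat.not_lt_zero k)⟩
          · intro hpos hrn
            exact h4 hrn rfl (by omega)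
          · exact h3
          · exact h5
        | some s =>
          obtain ⟨hs0, hsi, hC, hz, hp⟩ := h2
          subst hC
          have hext : extend [s, (i : Int) - 1] (i : Int) = [s, (i : Int)] := by
            simp [extend, PySem.List.pyGetD]
          rw [show fpWalk ((v.length : Nat) : Int) x v [a] L [s, (i : Int) - 1] (i : Int)
              = (if pySeqLen ((v.length : Nat) : Int) [s, (i : Int)] = ((v.length : Nat) : Int)
                 then [s, (i : Int)]
                 else spWalk ((v.length : Nat) : Int) x v L [s, (i : Int)] 0) from by
            simp only [fpWalk, if_pos hax]
            rw [hext]]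
          have hcoll : collectRuns x [a] (i : Int) runs (some s) = (runs, some s) := by
            simp [collectRuns, hax]
          rw [hcoll,
            show post ((v.length : Nat) : Int) (runs, some s)
              = postRuns ((v.length : Nat) : Int) (runs ++ [(s, ((v.length : Nat) : Int) - 1)])
              from post_eq_postRuns _ _]
          exact wrap_match v x L runs s i hi1 h1 hs0 (by omega) hz hp h3 h5
      · rw [show fpWalk ((v.length : Nat) : Int) x v [a] L C (i : Int)
            = spWalk ((v.length : Nat) : Int) x v (maxsel ((v.length : Nat) : Int) L C) [] 0 from by
          simp only [fpWalk, if_neg hax]]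
        cases start with
        | none =>
          have hC : C = [] := h2
          subst hC
          have hLL : maxsel ((v.length : Nat) : Int) L [] = L :=
            maxsel_of_le _ _ _ (by rw [pySeqLen_nil, h1]; exact foldBest_nonneg _ _)
          rw [hLL]
          have hcoll : collectRuns x [a] (i : Int) runs none = (runs, none) := by
            simp [collectRuns, hax]
          rw [hcoll,
            show post ((v.length : Nat) : Int) (runs, none)
              = postRuns ((v.length : Nat) : Int) runs from post_eq_postRuns _ _]
          apply wrap_nonmatch v x L runs i hi1 h1
          · intro r hr
            have := h3 r hr
            exact ⟨this.1, this.2.1, by omega⟩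
          · intro hrn
            by_cases hi0 : i = 0
            · rw [show (0:Nat) = i from hi0.symm, hget]
              simp [hax]
            · exact h4 hrn rfl (by omega)
          · exact h5
        | some s =>
          obtain ⟨hs0, hsi, hC, hz, hp⟩ := h2
          subst hC
          have hL' : maxsel ((v.length : Nat) : Int) L [s, (i : Int) - 1]
              = foldBest ((v.length : Nat) : Int) (runs ++ [(s, (i : Int) - 1)]) := by
            rw [h1, foldBest_append_singleton]
          rw [hL']
          have hcoll : collectRuns x [a] (i : Int) runs (some s)
              = (runs ++ [(s, (i : Int) - 1)], none) := by
            simp [collectRuns, hax]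
          rw [hcoll,
            show post ((v.length : Nat) : Int) (runs ++ [(s, (i : Int) - 1)], none)
              = postRuns ((v.length : Nat) : Int) (runs ++ [(s, (i : Int) - 1)])
              from post_eq_postRuns _ _]
          apply wrap_nonmatch v x _ _ i hi1 rfl
          · intro r hr
            rcases List.mem_append.mp hr with h | h
            · have := h3 r h
              exact ⟨this.1, this.2.1, by omega⟩
            · simp at h
              subst h
              exact ⟨hs0, by omega, by omega⟩
          · intro habs
            simp at habs
          · intro r0 rs0 heq
            cases runs with
            | nil =>
              obtain ⟨heq1, heq2⟩ := List.cons.inj (by simpa using heq)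
              subst heq1
              constructor
              · intro hpos
                exact hp hpos rfl
              · intro h0
                obtain ⟨_, hall⟩ := hz h0
                have hs00 : s = 0 := h0
                have hipos : 0 < i := by omega
                refine ⟨?_, ?_⟩
                · intro k hk
                  have hk' : (k : Int) ≤ (i : Int) - 1 := hk
                  exact hall k (by omega)
                · show v[((i : Int) - 1).toNat + 1]? ≠ some x
                  have htn : ((i : Int) - 1).toNat + 1 = i := by omega
                  rw [htn, hget]
                  simp [hax]
            | cons q qs =>
              have heq1 : q = r0 := by
                have := congrArg (fun l => l.head?) heq
                simpa using this
              subst heq1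
              exact h5 q qs rfl



-- A's loop in the wrapped phase is the structural walk spWalk
lemma loopA_wrapped (v : List Int) (x : Int) :
    ∀ (l : List Int) (i : Nat) (fuel : Nat) (L C : List Int),
    v.drop i = l → l ≠ [] → l.length ≤ fuel →
    loopA v x fuel L C true (i : Int) = spWalk (v.length : Int) x l L C (i : Int) := by
  intro l
  induction l with
  | nil => intro i fuel L C _ hne _; exact absurd rfl hne
  | cons a rest ih =>
    intro i fuel L C hdrop hne hfuel
    cases fuel with
    | zero => simp at hfuel
    | succ f =>
      have hlen : i + rest.length + 1 = v.length := by
        have := congrArg List.length hdrop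
        simp at this; omega
      have hi : i < v.length := by omega
      have hget : PySem.List.pyGet? v (i : Int) = some a := by
        rw [PySem.List.pyGet?_natCast]
        have h0 : v[i]? = (v.drop i)[0]? := by simp [List.getElem?_drop]
        rw [h0, hdrop]; rfl
      have hdrop1 : v.drop (i + 1) = rest := by
        have h1 : v.drop (i + 1) = (v.drop i).drop 1 := by rw [List.drop_drop]
        rw [h1, hdrop]; rfl
      simp only [loopA, hget]
      by_cases hax : a = x
      · simp only [if_pos hax]
        cases rest with
        | nil =>
          have hge : ((i : Int) + 1 ≥ (v.length : Int)) := by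
            simp at hlen; omega
          simp only [spWalk, if_pos hax]
          simp [hge]
        | cons b bs =>
          have hlt : ¬ ((i : Int) + 1 ≥ (v.length : Int)) := by
            simp only [List.length_cons] at hlen; omega
          have hrec := ih (i + 1) f L (extend C (i : Int))
            hdrop1 (List.cons_ne_nil _ _)
            (by simp only [List.length_cons] at hfuel ⊢; omega)
          have hcast : ((i : Int) + 1) = ((i + 1 : Nat) : Int) := by push_cast; ring
          simp only [Bool.true_eq_false, false_and, if_neg (not_false), if_neg hlt]
          rw [show spWalk ((v.length : Nat) : Int) x (a :: b :: bs) L C (i : Int)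
              = spWalk ((v.length : Nat) : Int) x (b :: bs) L (extend C (i : Int)) ((i : Int) + 1) from by
            simp only [spWalk, if_pos hax]]
          rw [hcast, ← hrec]
          simp only [extend]
      · simp only [if_neg hax]
        rw [spWalk_mismatch _ _ _ _ _ _ _ hax]
        simp [maxsel]

-- A's loop in the first phase is the structural walk fpWalk
lemma loopA_firstpass (v : List Int) (x : Int) :
    ∀ (l : List Int) (i : Nat) (fuel : Nat) (L C : List Int),
    v.drop i = l → l ≠ [] → l.length + v.length ≤ fuel →
    loopA v x fuel L C false (i : Int) = fpWalk (v.length : Int) x v l L C (i : Int) := by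
  intro l
  induction l with
  | nil => intro i fuel L C _ hne _; exact absurd rfl hne
  | cons a rest ih =>
    intro i fuel L C hdrop hne hfuel
    cases fuel with
    | zero => simp at hfuel
    | succ f =>
      have hlen : i + rest.length + 1 = v.length := by
        have := congrArg List.length hdrop
        simp at this; omega
      have hi : i < v.length := by omega
      have hvne : v ≠ [] := List.ne_nil_of_length_pos (by omega)
      have hget : PySem.List.pyGet? v (i : Int) = some a := by
        rw [PySem.List.pyGet?_natCast]
        have h0 : v[i]? = (v.drop i)[0]? := by simp [List.getElem?_drop]
        rw [h0, hdrop]; rfl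
      have hdrop1 : v.drop (i + 1) = rest := by
        have h1 : v.drop (i + 1) = (v.drop i).drop 1 := by rw [List.drop_drop]
        rw [h1, hdrop]; rfl
      have hcast : ((i : Int) + 1) = ((i + 1 : Nat) : Int) := by push_cast; ring
      simp only [loopA, hget]
      by_cases hax : a = x
      · simp only [if_pos hax]
        cases rest with
        | nil =>
          have hwrap : ((i : Int) = (v.length : Int) - 1) := by
            simp at hlen; omega
          simp only [fpWalk, if_pos hax]
          rw [if_pos (⟨by trivial, hwrap⟩ : _ ∧ _)]
          by_cases hfull : pySeqLen (v.length : Int) (extend C (i : Int)) = (v.length : Int)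
          · simp only [extend] at hfull ⊢
            rw [if_pos hfull, if_pos hfull]
          · simp only [extend] at hfull ⊢
            rw [if_neg hfull, if_neg hfull,
              if_neg (show ¬ ((0:Int) ≥ (v.length : Int)) by push_cast; omega)]
            have := loopA_wrapped v x v 0 f L
              (extend C (i : Int)) (by simp) hvne (by simp at hfuel; omega)
            simp only [extend, Nat.cast_zero] at this
            simpa using this
        | cons b bs =>
          have hnw : ¬ ((i : Int) = (v.length : Int) - 1) := by
            simp only [List.length_cons] at hlen; omega
          have hlt : ¬ ((i : Int) + 1 ≥ (v.length : Int)) := by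
            simp only [List.length_cons] at hlen; omega
          have hrec := ih (i + 1) f L (extend C (i : Int))
            hdrop1 (List.cons_ne_nil _ _)
            (by simp only [List.length_cons] at hfuel ⊢; omega)
          rw [if_neg (by simpa using hnw), if_neg hlt]
          rw [show fpWalk ((v.length : Nat) : Int) x v (a :: b :: bs) L C (i : Int)
              = fpWalk ((v.length : Nat) : Int) x v (b :: bs) L (extend C (i : Int)) ((i : Int) + 1) from by
            simp only [fpWalk, if_pos hax]]
          rw [hcast, ← hrec]
          simp only [extend]
      · simp only [if_neg hax, Bool.false_eq_true, if_neg (not_false)]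
        cases rest with
        | nil =>
          have hwrap : ((i : Int) = (v.length : Int) - 1) := by
            simp at hlen; omega
          rw [if_pos (⟨by trivial, hwrap⟩ : _ ∧ _)]
          have hnfull : ¬ (pySeqLen (v.length : Int) ([] : List Int) = (v.length : Int)) := by
            rw [pySeqLen_nil]; omega
          rw [if_neg hnfull, if_neg (show ¬ ((0:Int) ≥ (v.length : Int)) by push_cast; omega)]
          have := loopA_wrapped v x v 0 f
            (if pySeqLen (v.length : Int) C > pySeqLen (v.length : Int) L then C else L)
            [] (by simp) hvne (by simp at hfuel; omega)
          simp only [Nat.cast_zero] at this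
          simp only [fpWalk, if_neg hax]
          rw [this]
          simp only [maxsel]
        | cons b bs =>
          have hnw : ¬ ((i : Int) = (v.length : Int) - 1) := by
            simp only [List.length_cons] at hlen; omega
          have hlt : ¬ ((i : Int) + 1 ≥ (v.length : Int)) := by
            simp only [List.length_cons] at hlen; omega
          have hrec := ih (i + 1) f (maxsel (v.length : Int) L C) []
            hdrop1 (List.cons_ne_nil _ _)
            (by simp only [List.length_cons] at hfuel ⊢; omega)
          rw [if_neg (by simpa using hnw), if_neg hlt]
          rw [show fpWalk ((v.length : Nat) : Int) x v (a :: b :: bs) L C (i : Int)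
              = fpWalk ((v.length : Nat) : Int) x v (b :: bs) (maxsel ((v.length : Nat) : Int) L C) [] ((i : Int) + 1) from by
            simp only [fpWalk, if_neg hax]]
          rw [hcast, ← hrec]
          simp only [maxsel]

lemma alt_eq_post (v : List Int) (x : Int) :
    longest_circular_sequence_alt v x = post (v.length : Int) (collectRuns x v 0 [] none) := by
  rfl

-- ===== VERDICT (by name: the statement is the Claim_ definition above) =====
theorem longest_circular_sequence_spec : Claim_equal_longest_circular_sequence := by
  intro v x _ hpre
  unfold Spec_longest_circular_sequence
  have hv : v ≠ [] := hpre
  have hlen : 0 < v.length := List.length_pos_iff.mpr hv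
  have h1 : longest_circular_sequence v x =
      fpWalk (v.length : Int) x v v [] [] (( 0 : Nat) : Int) := by
    unfold longest_circular_sequence
    exact loopA_firstpass v x v 0 (2 * v.length + 2) [] [] (by simp) hv (by omega)
  have h2 := fpWalk_post v x v 0 [] none [] [] (by simp) hv
    (by unfold LoopInv; refine ⟨rfl, rfl, ?_, ?_, ?_⟩ <;> simp [foldBest])
  rw [alt_eq_post]
  simpa using h1.trans (by simpa using h2)
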